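-- pv_equiv track=rewrite | github.com/e-vdb/buildingAI-Reaktor | Chapter2/exercise7.py | count
-- ===== SOURCE A (Python) =====
-- def count(seq):
--     occurence=0
--     for i in range(len(seq)-4):
--         test=True
--         for j in range(i,i+5):
--             if seq[j]!=1:
--                 test=False
--         if test:
--             occurence+=1
--     return occurence
-- ===== SOURCE B (Python) =====
-- def count(seq):
--     occurence = 0
--     run = 0
--     for x in seq:
--         if x == 1:
--             run += 1
--         else:
--             run = 0
--         if run >= 5:
--             occurence += 1
--     return occurence
-- ===== Notes on version B (the rewrite author's own statement) =====
-- stated objective: simpler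
-- what changed: Replaces the nested window scan (for every start index, re-test all 5 elements) by a single pass that maintains a running count of consecutive ones and counts each position where the run reaches 5.
import Mathlib
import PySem

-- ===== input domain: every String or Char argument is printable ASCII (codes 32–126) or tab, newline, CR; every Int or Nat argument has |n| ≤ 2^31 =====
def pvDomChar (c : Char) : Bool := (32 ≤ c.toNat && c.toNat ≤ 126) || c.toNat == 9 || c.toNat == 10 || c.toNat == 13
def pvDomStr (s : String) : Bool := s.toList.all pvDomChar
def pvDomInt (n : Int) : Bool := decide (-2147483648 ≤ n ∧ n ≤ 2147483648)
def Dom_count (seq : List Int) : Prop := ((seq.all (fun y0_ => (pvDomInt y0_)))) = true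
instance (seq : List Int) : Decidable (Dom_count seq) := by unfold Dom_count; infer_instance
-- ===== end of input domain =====

-- B replaces A's nested window rescans by one pass keeping a run length of consecutive ones (simpler).

-- ===== PORT A =====
-- seq[j] is ported with pyGetD: every index A reads satisfies 0 ≤ j < len(seq), so the default is never used.
def count (seq : List Int) : Int :=
  (PySem.List.pyRange 0 ((seq.length : Int) - 4) 1).foldl
    (fun occurence i =>
      let test := (PySem.List.pyRange i (i + 5) 1).foldl
        (fun test j => if PySem.List.pyGetD seq j 0 ≠ 1 then false else test) true
      if test then occurence + 1 else occurence) 0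

-- ===== PORT B =====
def count_alt (seq : List Int) : Int :=
  (seq.foldl
    (fun (st : Int × Int) x =>
      let run : Int := if x = 1 then st.1 + 1 else 0
      (run, if run ≥ 5 then st.2 + 1 else st.2))
    (0, 0)).2

-- ===== PRECONDITION & SPEC =====
def Spec_count (seq : List Int) (out : Int) : Prop := out = count_alt seq
instance (seq : List Int) (out : Int) : Decidable (Spec_count seq out) := by unfold Spec_count; infer_instance

-- ===== CLAIM (what is proved, stated in full; the proofs are below) =====
def Claim_equal_count : Prop := ∀ (seq : List Int), Dom_count seq → Spec_count seq (count seq)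

-- ===== LEMMAS AND PROOFS =====

-- number of trailing ones of a list
def pvTrail (xs : List Int) : Nat := (xs.reverse.takeWhile (· == 1)).length

lemma pvTrail_le (xs : List Int) : pvTrail xs ≤ xs.length := by
  have h := (List.takeWhile_prefix (l := xs.reverse) (p := (· == (1 : Int)))).length_le
  simpa [pvTrail] using h

lemma pvTrail_snoc (xs : List Int) (x : Int) :
    pvTrail (xs ++ [x]) = if x = 1 then pvTrail xs + 1 else 0 := by
  simp only [pvTrail, List.reverse_append, List.reverse_singleton, List.singleton_append,
    List.takeWhile_cons]
  by_cases h : x = 1 <;> simp [h]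

-- m ≤ length of takeWhile ↔ first m entries satisfy p
lemma le_length_takeWhile_iff (p : Int → Bool) :
    ∀ (l : List Int) (m : Nat), m ≤ (l.takeWhile p).length ↔ (l.take m).all p = true ∧ m ≤ l.length := by
  intro l
  induction l with
  | nil => intro m; simp
  | cons a l ih =>
    intro m
    cases m with
    | zero => simp
    | succ m =>
      by_cases h : p a
      · simp [h, ih m]
      · simp [h]

-- the inner loop is an `all` over the range
lemma inner_eq_all (s : List Int) :
    ∀ (l : List Int) (b : Bool),
      l.foldl (fun t j => if PySem.List.pyGetD s j 0 ≠ 1 then false else t) b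
        = (b && l.all (fun j => PySem.List.pyGetD s j 0 == 1)) := by
  intro l
  induction l with
  | nil => intro b; simp
  | cons a l ih =>
    intro b
    simp only [List.foldl_cons, List.all_cons]
    rw [ih]
    by_cases h : PySem.List.pyGetD s a 0 = 1
    · simp [h]
    · simp [h]

lemma all_congr_mem (l : List Int) (p q : Int → Bool) (h : ∀ x ∈ l, p x = q x) :
    l.all p = l.all q := by
  induction l with
  | nil => rfl
  | cons a l ih =>
    simp only [List.all_cons, h a (by simp), ih (fun x hx => h x (by simp [hx]))]

lemma pyGetD_append_left (xs ys : List Int) (j d : Int) (h0 : 0 ≤ j) (h1 : j < (xs.length : Int)) :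
    PySem.List.pyGetD (xs ++ ys) j d = PySem.List.pyGetD xs j d := by
  have hlen : j < ((xs ++ ys).length : Int) := by
    simp only [List.length_append]; push_cast; omega
  rw [PySem.List.pyGetD_eq_getElem (xs ++ ys) d h0 (by simpa using hlen),
      PySem.List.pyGetD_eq_getElem xs d h0 h1]
  have hj : j.toNat < xs.length := by omega
  exact List.getElem_append_left hj

-- 4 ≤ trailing ones ↔ the last 4 elements are all 1 (needs 4 ≤ length)
lemma trail_ge_four_iff (xs : List Int) (hn : 4 ≤ xs.length) :
    4 ≤ pvTrail xs ↔ (xs.drop (xs.length - 4)).all (· == 1) = true := by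
  rw [pvTrail, le_length_takeWhile_iff]
  have hrev : xs.reverse.take 4 = (xs.drop (xs.length - 4)).reverse := by
    rw [List.reverse_drop]
    congr 1
    omega
  rw [hrev]
  constructor
  · rintro ⟨h, -⟩; simpa using h
  · intro h; exact ⟨by simpa using h, by simpa using hn⟩

-- A's count of a snoc: old count plus one iff the new last window is all ones
lemma count_snoc (xs : List Int) (x : Int) :
    count (xs ++ [x]) = count xs + (if x = 1 ∧ 4 ≤ pvTrail xs then 1 else 0) := by
  by_cases hn : xs.length < 4
  · have h1 : (((xs ++ [x]).length : Int) - 4) ≤ 0 := by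
      simp only [List.length_append, List.length_singleton]; push_cast; omega
    have h2 : (((xs).length : Int) - 4) ≤ 0 := by omega
    have ht : ¬ (4 ≤ pvTrail xs) := by
      have := pvTrail_le xs; omega
    have e1 : PySem.List.pyRange 0 (((xs ++ [x]).length : Int) - 4) 1 = [] :=
      PySem.List.pyRange_one_eq_nil h1
    have e2 : PySem.List.pyRange 0 (((xs).length : Int) - 4) 1 = [] :=
      PySem.List.pyRange_one_eq_nil h2
    unfold count
    rw [e1, e2]
    simp [ht]
  · replace hn : 4 ≤ xs.length := by omega
    have hb : (((xs ++ [x]).length : Int) - 4) = ((xs.length : Int) - 4) + 1 := by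
      simp only [List.length_append, List.length_singleton]; push_cast; ring
    have hsplit : PySem.List.pyRange 0 (((xs ++ [x]).length : Int) - 4) 1
        = PySem.List.pyRange 0 ((xs.length : Int) - 4) 1 ++ [(xs.length : Int) - 4] := by
      rw [hb]
      exact PySem.List.pyRange_one_succ_right (by omega)
    rw [count, hsplit, List.foldl_append]
    -- prefix indices: the appended element is never read
    have hpref : ∀ (acc : Int), ∀ i ∈ PySem.List.pyRange 0 ((xs.length : Int) - 4) 1,
        (fun occurence i =>
          let test := (PySem.List.pyRange i (i + 5) 1).foldl
            (fun test j => if PySem.List.pyGetD (xs ++ [x]) j 0 ≠ 1 then false else test) true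
          if test then occurence + 1 else occurence) acc i
        = (fun occurence i =>
          let test := (PySem.List.pyRange i (i + 5) 1).foldl
            (fun test j => if PySem.List.pyGetD xs j 0 ≠ 1 then false else test) true
          if test then occurence + 1 else occurence) acc i := by
      intro acc i hi
      rw [PySem.List.mem_pyRange_one] at hi
      have hinner : (PySem.List.pyRange i (i + 5) 1).foldl
            (fun test j => if PySem.List.pyGetD (xs ++ [x]) j 0 ≠ 1 then false else test) true
          = (PySem.List.pyRange i (i + 5) 1).foldl
            (fun test j => if PySem.List.pyGetD xs j 0 ≠ 1 then false else test) true := by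
        apply PySem.List.foldl_congr_mem
        intro t j hj
        rw [PySem.List.mem_pyRange_one] at hj
        rw [pyGetD_append_left xs [x] j 0 (by omega) (by omega)]
      simp only [hinner]
    rw [PySem.List.foldl_congr_mem _ _ _ _ hpref]
    have hcxs : (PySem.List.pyRange 0 ((xs.length : Int) - 4) 1).foldl
        (fun occurence i =>
          let test := (PySem.List.pyRange i (i + 5) 1).foldl
            (fun test j => if PySem.List.pyGetD xs j 0 ≠ 1 then false else test) true
          if test then occurence + 1 else occurence) 0 = count xs := rfl
    rw [hcxs]
    -- last window
    simp only [List.foldl_cons, List.foldl_nil]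
    rw [inner_eq_all]
    have hsplit2 : PySem.List.pyRange ((xs.length : Int) - 4) (((xs.length : Int) - 4) + 5) 1
        = PySem.List.pyRange ((xs.length : Int) - 4) (xs.length : Int) 1 ++ [(xs.length : Int)] := by
      have : ((xs.length : Int) - 4) + 5 = (xs.length : Int) + 1 := by ring
      rw [this]
      exact PySem.List.pyRange_one_succ_right (by omega)
    rw [hsplit2, List.all_append]
    have hlast : PySem.List.pyGetD (xs ++ [x]) (xs.length : Int) 0 = x := by
      rw [PySem.List.pyGetD_eq_getElem (xs ++ [x]) 0 (by positivity)
        (by simp)]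
      simp
    have hmid : (PySem.List.pyRange ((xs.length : Int) - 4) (xs.length : Int) 1).all
          (fun j => PySem.List.pyGetD (xs ++ [x]) j 0 == 1)
        = (xs.drop (xs.length - 4)).all (· == 1) := by
      have hcong : (PySem.List.pyRange ((xs.length : Int) - 4) (xs.length : Int) 1).all
            (fun j => PySem.List.pyGetD (xs ++ [x]) j 0 == 1)
          = (PySem.List.pyRange ((xs.length : Int) - 4) (xs.length : Int) 1).all
            (fun j => PySem.List.pyGetD xs j 0 == 1) := by
        apply all_congr_mem
        intro j hj
        rw [PySem.List.mem_pyRange_one] at hj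
        rw [pyGetD_append_left xs [x] j 0 (by omega) (by omega)]
      rw [hcong]
      have hmap := PySem.List.map_pyGetD_pyRange (xs := xs) (a := (xs.length : Int) - 4)
        (d := 0) (by omega)
      have : (PySem.List.pyRange ((xs.length : Int) - 4) (xs.length : Int) 1).all
            (fun j => PySem.List.pyGetD xs j 0 == 1)
          = ((PySem.List.pyRange ((xs.length : Int) - 4) (xs.length : Int) 1).map
              (fun j => PySem.List.pyGetD xs j 0)).all (· == 1) := by
        rw [List.all_map]; rfl
      rw [this]
      have hlen : PySem.List.pyRange ((xs.length : Int) - 4) (PySem.List.len xs) 1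
          = PySem.List.pyRange ((xs.length : Int) - 4) (xs.length : Int) 1 := by
        simp [PySem.List.len_eq]
      rw [← hlen, hmap]
      have harg : ((xs.length : Int) - 4).toNat = xs.length - 4 := by omega
      rw [harg]
    simp only [List.all_cons, List.all_nil, Bool.and_true]
    rw [hmid, hlast]
    by_cases hx : x = 1
    · by_cases htr : 4 ≤ pvTrail xs
      · have hall : (xs.drop (xs.length - 4)).all (· == 1) = true :=
          (trail_ge_four_iff xs hn).mp htr
        simp [hx, htr, hall]
      · have hall : ¬ (xs.drop (xs.length - 4)).all (· == 1) = true :=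
          fun h => htr ((trail_ge_four_iff xs hn).mpr h)
        simp [hx, htr, hall]
    · simp [hx]

lemma count_nil : count [] = 0 := by decide

lemma B_fold (seq : List Int) :
    seq.foldl
      (fun (st : Int × Int) x =>
        let run : Int := if x = 1 then st.1 + 1 else 0
        (run, if run ≥ 5 then st.2 + 1 else st.2))
      (0, 0) = ((pvTrail seq : Int), count seq) := by
  induction seq using List.reverseRecOn with
  | nil => simp [pvTrail, count_nil]
  | append_singleton xs x ih =>
    rw [List.foldl_append, ih]
    simp only [List.foldl_cons, List.foldl_nil]
    rw [count_snoc xs x, pvTrail_snoc xs x]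
    by_cases hx : x = 1
    · by_cases htr : 4 ≤ pvTrail xs
      · have h5 : ((pvTrail xs : Int) + 1 ≥ 5) := by exact_mod_cast by omega
        simp [hx, htr, h5]
      · have h5 : ¬ ((pvTrail xs : Int) + 1 ≥ 5) := by
          intro h
          exact htr (by exact_mod_cast (by omega : (4 : Int) ≤ (pvTrail xs : Int)))
        simp [hx, htr, h5]
    · simp [hx]

-- ===== VERDICT (by name: the statement is the Claim_ definition above) =====
theorem count_spec : Claim_equal_count := by
  intro seq _
  unfold Spec_count count_alt
  rw [B_fold]
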